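-- pv_equiv track=rewrite | github.com/AmberLee2427/chunky | src/chunky/chunkers/rst.py | _directive_boundaries
-- ===== SOURCE A (Python) =====
-- from typing import List, Optional, Set, Tuple
--
-- def _directive_boundaries(lines: List[str]) -> Set[int]:
--     """Return split boundaries to avoid inside RST directive blocks."""
--
--     avoid: Set[int] = set()
--     in_directive = False
--     directive_indent = 0
--
--     for idx, line in enumerate(lines[:-1]):
--         stripped = line.lstrip()
--         indent = len(line) - len(stripped)
--
--         if stripped.startswith(".. "):
--             in_directive = True
--             directive_indent = indent
--             avoid.add(idx + 1)
--             continue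
--
--         if in_directive:
--             if not stripped:
--                 avoid.add(idx + 1)
--                 continue
--             if indent > directive_indent:
--                 avoid.add(idx + 1)
--                 continue
--             in_directive = False
--
--     return avoid
-- ===== SOURCE B (Python) =====
-- from typing import List, Set
--
-- def _directive_boundaries(lines: List[str]) -> Set[int]:
--     """Return split boundaries to avoid inside RST directive blocks."""
--
--     avoid: Set[int] = set()
--     n = len(lines) - 1
--     i = 0
--     while i < n:
--         stripped = lines[i].lstrip()
--         if stripped.startswith(".. "):
--             directive_indent = len(lines[i]) - len(stripped)
--             avoid.add(i + 1)
--             j = i + 1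
--             while j < n:
--                 s = lines[j].lstrip()
--                 if s.startswith(".. "):
--                     break
--                 if not s or len(lines[j]) - len(s) > directive_indent:
--                     avoid.add(j + 1)
--                     j += 1
--                 else:
--                     break
--             i = j
--         else:
--             i += 1
--     return avoid
-- ===== Notes on version B (the rewrite author's own statement) =====
-- stated objective: alternative
-- what changed: Replaced the single-pass boolean state machine (in_directive flag threaded through one for-loop) with a two-level decomposition: an outer while-loop scans for '.. ' directive starts and an inner while-loop consumes each directive block, breaking back to the outer loop on a dedent or a nested directive start.
import Mathlib
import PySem

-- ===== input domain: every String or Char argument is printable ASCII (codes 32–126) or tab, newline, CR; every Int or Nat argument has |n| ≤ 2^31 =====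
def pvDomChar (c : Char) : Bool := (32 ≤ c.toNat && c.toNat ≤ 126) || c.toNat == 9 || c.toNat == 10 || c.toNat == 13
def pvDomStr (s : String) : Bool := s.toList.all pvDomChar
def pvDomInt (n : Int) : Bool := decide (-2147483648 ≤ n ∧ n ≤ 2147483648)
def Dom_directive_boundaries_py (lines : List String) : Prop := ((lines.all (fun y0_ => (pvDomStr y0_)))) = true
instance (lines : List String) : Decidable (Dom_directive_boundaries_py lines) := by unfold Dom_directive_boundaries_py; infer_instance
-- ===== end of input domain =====

-- B replaces A's flat state-machine pass with an outer scan for directive starts and an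
-- inner loop that consumes each directive block (objective: alternative decomposition, same cost).

-- ===== PORT A =====
-- loop body of A's for-loop: state is (avoid, in_directive, directive_indent), p is (idx, line)
def dbStep (st : PySem.Set Int × Bool × Int) (p : Int × String) : PySem.Set Int × Bool × Int :=
  let stripped := PySem.Str.lstrip p.2
  let indent : Int := PySem.Str.len p.2 - PySem.Str.len stripped
  if PySem.Str.startswith stripped ".. " then
    (PySem.Set.add st.1 (p.1 + 1), true, indent)
  else if st.2.1 then
    if stripped = "" then (PySem.Set.add st.1 (p.1 + 1), st.2.1, st.2.2)
    else if indent > st.2.2 then (PySem.Set.add st.1 (p.1 + 1), st.2.1, st.2.2)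
    else (st.1, false, st.2.2)
  else st

def directive_boundaries_py (lines : List String) : List Int :=
  ((PySem.List.enumerate (PySem.List.slice lines none (some (-1)))).foldl dbStep
    (PySem.Set.empty, false, 0)).1

-- ===== PORT B =====
-- inner while-loop of B: consume the body of a directive with indent dind, from index j.
-- lines.getD j "" is lines[j], exact since j < n ≤ len lines; the fuel argument only makes the
-- recursion structural and is sufficient (≥ n - j) at every call site.
def dbInner (lines : List String) (n : Nat) (dind : Int) :
    PySem.Set Int → Nat → Nat → PySem.Set Int × Nat
  | avoid, j, 0 => (avoid, j)
  | avoid, j, fuel + 1 =>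
    if j < n then
      let line := lines.getD j ""
      let s := PySem.Str.lstrip line
      if PySem.Str.startswith s ".. " then (avoid, j)
      else if s = "" ∨ PySem.Str.len line - PySem.Str.len s > dind then
        dbInner lines n dind (PySem.Set.add avoid ((j : Int) + 1)) (j + 1) fuel
      else (avoid, j)
    else (avoid, j)

-- outer while-loop of B (same fuel device)
def dbOuter (lines : List String) (n : Nat) : PySem.Set Int → Nat → Nat → PySem.Set Int
  | avoid, _, 0 => avoid
  | avoid, i, fuel + 1 =>
    if i < n then
      let line := lines.getD i ""
      let s := PySem.Str.lstrip line
      if PySem.Str.startswith s ".. " then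
        let r := dbInner lines n (PySem.Str.len line - PySem.Str.len s)
                   (PySem.Set.add avoid ((i : Int) + 1)) (i + 1) fuel
        dbOuter lines n r.1 r.2 fuel
      else dbOuter lines n avoid (i + 1) fuel
    else avoid

def directive_boundaries_py_alt (lines : List String) : List Int :=
  dbOuter lines (lines.length - 1) PySem.Set.empty 0 lines.length

-- ===== PRECONDITION & SPEC =====
def Spec_directive_boundaries_py (lines : List String) (out : List Int) : Prop := out = directive_boundaries_py_alt lines
instance (lines : List String) (out : List Int) : Decidable (Spec_directive_boundaries_py lines out) := by unfold Spec_directive_boundaries_py; infer_instance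

-- ===== CLAIM (what is proved, stated in full; the proofs are below) =====
def Claim_equal_directive_boundaries_py : Prop := ∀ (lines : List String), Dom_directive_boundaries_py lines → Spec_directive_boundaries_py lines (directive_boundaries_py lines)

-- ===== LEMMAS AND PROOFS =====

-- one-step / exhausted equations, stated over the Str wrappers (pins the loop index for rewriting)
theorem dbInner_step {n j : Nat} (lines : List String) (dind : Int) (avoid : PySem.Set Int)
    (f : Nat) (h : j < n) : dbInner lines n dind avoid j (f + 1) =
      (if PySem.Str.startswith (PySem.Str.lstrip (lines.getD j "")) ".. " then (avoid, j)
       else if PySem.Str.lstrip (lines.getD j "") = "" ∨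
           PySem.Str.len (lines.getD j "") - PySem.Str.len (PySem.Str.lstrip (lines.getD j "")) > dind then
         dbInner lines n dind (PySem.Set.add avoid ((j : Int) + 1)) (j + 1) f
       else (avoid, j)) := by
  rw [dbInner, if_pos h]

theorem dbInner_stop {n j : Nat} (lines : List String) (dind : Int) (avoid : PySem.Set Int)
    (h : ¬ j < n) : ∀ f, dbInner lines n dind avoid j f = (avoid, j) := by
  intro f; cases f
  · rfl
  · rw [dbInner, if_neg h]

theorem dbOuter_step {n i : Nat} (lines : List String) (avoid : PySem.Set Int)
    (f : Nat) (h : i < n) : dbOuter lines n avoid i (f + 1) =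
      (if PySem.Str.startswith (PySem.Str.lstrip (lines.getD i "")) ".. " then
         (fun r => dbOuter lines n r.1 r.2 f)
           (dbInner lines n (PySem.Str.len (lines.getD i "") - PySem.Str.len (PySem.Str.lstrip (lines.getD i "")))
             (PySem.Set.add avoid ((i : Int) + 1)) (i + 1) f)
       else dbOuter lines n avoid (i + 1) f) := by
  rw [dbOuter, if_pos h]

theorem dbOuter_stop {n i : Nat} (lines : List String) (avoid : PySem.Set Int)
    (h : ¬ i < n) : ∀ f, dbOuter lines n avoid i f = avoid := by
  intro f; cases f
  · rfl
  · rw [dbOuter, if_neg h]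

theorem dbInner_le (lines : List String) (n : Nat) (dind : Int) :
    ∀ (f : Nat) (avoid : PySem.Set Int) (j : Nat), j ≤ (dbInner lines n dind avoid j f).2 := by
  intro f
  induction f with
  | zero => intro avoid j; exact le_refl j
  | succ f ih =>
    intro avoid j
    by_cases hj : j < n
    · rw [dbInner_step lines dind avoid f hj]
      by_cases c1 : PySem.Str.startswith (PySem.Str.lstrip (lines.getD j "")) ".. " = true
      · rw [if_pos c1]
      · by_cases c2 : PySem.Str.lstrip (lines.getD j "") = "" ∨
            PySem.Str.len (lines.getD j "") - PySem.Str.len (PySem.Str.lstrip (lines.getD j "")) > dind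
        · rw [if_neg c1, if_pos c2]
          have := ih (PySem.Set.add avoid ((j : Int) + 1)) (j + 1)
          omega
        · rw [if_neg c1, if_neg c2]
    · rw [dbInner_stop lines dind avoid hj]

theorem dbInner_irrel (lines : List String) (n : Nat) (dind : Int) :
    ∀ (f1 f2 : Nat) (avoid : PySem.Set Int) (j : Nat), n - j ≤ f1 → n - j ≤ f2 →
      dbInner lines n dind avoid j f1 = dbInner lines n dind avoid j f2 := by
  intro f1
  induction f1 with
  | zero =>
    intro f2 avoid j h1 h2
    have hj : ¬ j < n := by omega
    rw [dbInner_stop lines dind avoid hj, dbInner_stop lines dind avoid hj]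
  | succ f1 ih =>
    intro f2 avoid j h1 h2
    by_cases hj : j < n
    · obtain ⟨f2', rfl⟩ : ∃ f2', f2 = f2' + 1 := ⟨f2 - 1, by omega⟩
      rw [dbInner_step lines dind avoid f1 hj, dbInner_step lines dind avoid f2' hj]
      by_cases c1 : PySem.Str.startswith (PySem.Str.lstrip (lines.getD j "")) ".. " = true
      · rw [if_pos c1, if_pos c1]
      · by_cases c2 : PySem.Str.lstrip (lines.getD j "") = "" ∨
            PySem.Str.len (lines.getD j "") - PySem.Str.len (PySem.Str.lstrip (lines.getD j "")) > dind
        · rw [if_neg c1, if_pos c2, if_neg c1, if_pos c2]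
          exact ih f2' (PySem.Set.add avoid ((j : Int) + 1)) (j + 1) (by omega) (by omega)
        · rw [if_neg c1, if_neg c2, if_neg c1, if_neg c2]
    · rw [dbInner_stop lines dind avoid hj, dbInner_stop lines dind avoid hj]

theorem dbOuter_irrel (lines : List String) (n : Nat) :
    ∀ (f1 f2 : Nat) (avoid : PySem.Set Int) (i : Nat), n - i ≤ f1 → n - i ≤ f2 →
      dbOuter lines n avoid i f1 = dbOuter lines n avoid i f2 := by
  intro f1
  induction f1 with
  | zero =>
    intro f2 avoid i h1 h2
    have hi : ¬ i < n := by omega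
    rw [dbOuter_stop lines avoid hi, dbOuter_stop lines avoid hi]
  | succ f1 ih =>
    intro f2 avoid i h1 h2
    by_cases hi : i < n
    · obtain ⟨f2', rfl⟩ : ∃ f2', f2 = f2' + 1 := ⟨f2 - 1, by omega⟩
      rw [dbOuter_step lines avoid f1 hi, dbOuter_step lines avoid f2' hi]
      by_cases c1 : PySem.Str.startswith (PySem.Str.lstrip (lines.getD i "")) ".. " = true
      · rw [if_pos c1, if_pos c1]
        have hinner := dbInner_irrel lines n
          (PySem.Str.len (lines.getD i "") - PySem.Str.len (PySem.Str.lstrip (lines.getD i "")))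
          f1 f2' (PySem.Set.add avoid ((i : Int) + 1)) (i + 1) (by omega) (by omega)
        rw [← hinner]
        have hle := dbInner_le lines n
          (PySem.Str.len (lines.getD i "") - PySem.Str.len (PySem.Str.lstrip (lines.getD i "")))
          f1 (PySem.Set.add avoid ((i : Int) + 1)) (i + 1)
        exact ih f2' _ _ (by omega) (by omega)
      · rw [if_neg c1, if_neg c1]
        exact ih f2' avoid (i + 1) (by omega) (by omega)
    · rw [dbOuter_stop lines avoid hi, dbOuter_stop lines avoid hi]

-- A's for-loop as an index recursion over lines[:-1] (again with a structural fuel)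
def runA (lines : List String) (n : Nat) : (PySem.Set Int × Bool × Int) → Nat → Nat →
    PySem.Set Int × Bool × Int
  | st, _, 0 => st
  | st, i, fuel + 1 =>
    if i < n then runA lines n (dbStep st ((i : Int), lines.getD i "")) (i + 1) fuel else st

theorem runA_step {n i : Nat} (lines : List String) (st : PySem.Set Int × Bool × Int)
    (f : Nat) (h : i < n) : runA lines n st i (f + 1)
      = runA lines n (dbStep st ((i : Int), lines.getD i "")) (i + 1) f := by
  rw [runA, if_pos h]

theorem runA_stop {n i : Nat} (lines : List String) (st : PySem.Set Int × Bool × Int)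
    (h : ¬ i < n) : ∀ f, runA lines n st i f = st := by
  intro f; cases f
  · rfl
  · rw [runA, if_neg h]

theorem runA_eq_foldl (lines : List String) :
    ∀ (k i : Nat) st, lines.dropLast.length - i ≤ k →
      (PySem.List.enumerate (lines.dropLast.drop i) (i : Int)).foldl dbStep st
        = runA lines lines.dropLast.length st i k := by
  intro k
  induction k with
  | zero =>
    intro i st h
    have hi : ¬ i < lines.dropLast.length := by omega
    rw [List.drop_of_length_le (by omega), runA_stop lines st hi]
    simp [PySem.List.enumerate_nil]
  | succ k ih =>
    intro i st h
    by_cases hi : i < lines.dropLast.length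
    · have hi' : i < lines.length := by
        have hl : lines.dropLast.length = lines.length - 1 := List.length_dropLast
        omega
      have hg : lines.getD i "" = lines.dropLast[i] := by
        rw [List.getD_eq_getElem _ _ hi']
        exact (List.getElem_dropLast hi).symm
      rw [List.drop_eq_getElem_cons hi, runA_step lines st k hi]
      rw [PySem.List.enumerate_cons, List.foldl_cons, hg]
      have hc : ((i : Int) + 1) = ((i + 1 : Nat) : Int) := by push_cast; ring
      rw [hc]
      exact ih (i + 1) _ (by omega)
    · rw [List.drop_of_length_le (by omega), runA_stop lines st hi]
      simp [PySem.List.enumerate_nil]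

-- the heart of the equivalence: A's state machine vs B's two nested loops
theorem runA_eq_outer (lines : List String) (n : Nat) :
    ∀ (k i : Nat) (avoid : PySem.Set Int) (d : Int) (b : Bool), n - i ≤ k →
      (runA lines n (avoid, b, d) i k).1
        = if b then (fun r => dbOuter lines n r.1 r.2 k) (dbInner lines n d avoid i k)
          else dbOuter lines n avoid i k := by
  intro k
  induction k with
  | zero =>
    intro i avoid d b h
    have hi : ¬ i < n := by omega
    rw [runA_stop lines _ hi, dbInner_stop lines d avoid hi]
    cases b <;> simp [dbOuter_stop, hi]
  | succ k ih =>
    intro i avoid d b h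
    by_cases hi : i < n
    · rw [runA_step lines _ k hi]
      by_cases c1 : PySem.Str.startswith (PySem.Str.lstrip (lines.getD i "")) ".. " = true
      · have c1' := c1; simp at c1'
        have lhs : ∀ b' : Bool, dbStep (avoid, b', d) ((i : Int), lines.getD i "")
            = (PySem.Set.add avoid ((i : Int) + 1), true,
               PySem.Str.len (lines.getD i "") - PySem.Str.len (PySem.Str.lstrip (lines.getD i ""))) := by
          intro b'; simp [dbStep, c1']
        cases b
        · rw [lhs false, ih (i + 1) _ _ true (by omega)]
          simp only [if_true, Bool.false_eq_true, if_false]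
          rw [dbOuter_step lines avoid k hi]
          simp only [if_pos c1]
        · rw [lhs true, ih (i + 1) _ _ true (by omega), dbInner_step lines d avoid k hi]
          simp only [if_true, if_pos c1]
          rw [dbOuter_step lines avoid k hi]
          simp only [if_pos c1]
      · have c1' := c1; simp at c1'
        cases b
        · -- not in a directive: both sides just advance
          have lhs : dbStep (avoid, false, d) ((i : Int), lines.getD i "") = (avoid, false, d) := by
            simp [dbStep, c1']
          rw [lhs, ih (i + 1) _ _ false (by omega)]
          simp only [Bool.false_eq_true, if_false]
          rw [dbOuter_step lines avoid k hi]
          simp only [if_neg c1]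
        · by_cases c2 : PySem.Str.lstrip (lines.getD i "") = "" ∨
              PySem.Str.len (lines.getD i "") - PySem.Str.len (PySem.Str.lstrip (lines.getD i "")) > d
          · -- blank or deeper-indented line inside the block: both sides add i+1 and continue
            have c2' := c2; simp at c2'
            have lhs : dbStep (avoid, true, d) ((i : Int), lines.getD i "")
                = (PySem.Set.add avoid ((i : Int) + 1), true, d) := by
              rcases c2' with c2' | c2'
              · simp [dbStep, c2', PySem.Chars.startswith]
              · by_cases c3 : PySem.Str.lstrip (lines.getD i "") = ""
                · have c3' := c3; simp at c3'
                  simp [dbStep, c3', PySem.Chars.startswith]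
                · have c3' := c3; simp at c3'
                  simp [dbStep, c1', c2', c3']
            rw [lhs, ih (i + 1) _ _ true (by omega), dbInner_step lines d avoid k hi]
            simp only [if_true, if_neg c1, if_pos c2]
            have hle := dbInner_le lines n d k (PySem.Set.add avoid ((i : Int) + 1)) (i + 1)
            exact (dbOuter_irrel lines n (k + 1) k _ _ (by omega) (by omega)).symm
          · -- block ends here: A leaves the directive, B's inner loop breaks
            have c2' := c2; push Not at c2'
            have c2a := c2'.1; have c2b := c2'.2
            simp at c2a; simp at c2b
            have lhs : dbStep (avoid, true, d) ((i : Int), lines.getD i "") = (avoid, false, d) := by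
              simp [dbStep, c1', c2a]
              omega
            rw [lhs, ih (i + 1) _ _ false (by omega), dbInner_step lines d avoid k hi]
            simp only [if_true, Bool.false_eq_true, if_false, if_neg c1, if_neg c2]
            rw [dbOuter_step lines avoid k hi]
            simp only [if_neg c1]
    · rw [runA_stop lines _ hi, dbInner_stop lines d avoid hi]
      cases b <;> simp [dbOuter_stop, hi]

-- ===== VERDICT (by name: the statement is the Claim_ definition above) =====
theorem directive_boundaries_py_spec : Claim_equal_directive_boundaries_py := by
  intro lines _
  unfold Spec_directive_boundaries_py directive_boundaries_py directive_boundaries_py_alt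
  rw [PySem.List.slice_to_neg_one]
  have h := runA_eq_foldl lines lines.dropLast.length 0 (PySem.Set.empty, false, 0) (by omega)
  rw [List.drop_zero] at h
  rw [show ((0 : Nat) : Int) = (0 : Int) from rfl] at h
  rw [h, runA_eq_outer lines lines.dropLast.length lines.dropLast.length 0
        PySem.Set.empty 0 false (by omega)]
  have hl : lines.dropLast.length = lines.length - 1 := List.length_dropLast
  simp only [Bool.false_eq_true, if_false, hl]
  exact dbOuter_irrel lines (lines.length - 1) (lines.length - 1) lines.length
    PySem.Set.empty 0 (by omega) (by omega)
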